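-- pv_equiv track=rewrite | github.com/harrietty/python-katas | katas/find_uniq_string.py | find_uniq_string
-- ===== SOURCE A (Python) =====
-- import collections
--
-- def find_uniq_string(arr):
--   def organise(str):
--     '''
--     Returns a string of chars in alphabetical order, lowercase, with any duplicates and spaces removed
--     '''
--     s = set(str.lower())
--     if ' ' in s: s.remove(' ')
--     return ''.join(sorted(list(s)))
--
--   organised_arr = [organise(s) for s in arr]
--   c = collections.Counter(organised_arr)
--   unique_chars = next(st for st in c if c[st] == 1)
--   return next(s for s in arr if unique_chars == organise(s))
-- ===== SOURCE B (Python) =====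
-- def find_uniq_string(arr):
--     def char_set(s):
--         return set(s.lower()) - {' '}
--
--     sets = [char_set(s) for s in arr]
--     return next(arr[i] for i, cs in enumerate(sets)
--                 if all(i == j or cs != other for j, other in enumerate(sets)))
-- ===== Notes on version B (the rewrite author's own statement) =====
-- stated objective: alternative
-- what changed: B removes A's canonicalisation pipeline entirely (no sorted-string signatures, no Counter, no second rescan of arr): it keeps each element's raw character set and returns, in one enumerate pass, the element whose set differs from every other element's set by direct pairwise set comparison.
import Mathlib
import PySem

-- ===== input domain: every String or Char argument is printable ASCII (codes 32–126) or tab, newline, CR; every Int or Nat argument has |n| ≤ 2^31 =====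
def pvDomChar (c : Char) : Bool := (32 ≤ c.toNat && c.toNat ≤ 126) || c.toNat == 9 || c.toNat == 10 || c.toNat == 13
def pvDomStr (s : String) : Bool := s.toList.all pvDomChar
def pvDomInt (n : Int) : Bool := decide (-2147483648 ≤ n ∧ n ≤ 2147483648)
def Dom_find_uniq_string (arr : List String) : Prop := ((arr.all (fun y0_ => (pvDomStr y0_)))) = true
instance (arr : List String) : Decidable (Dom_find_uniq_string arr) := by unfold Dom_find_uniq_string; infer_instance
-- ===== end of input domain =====

-- B drops A's canonicalisation machinery (sorted-string signatures, Counter, second rescan of arr):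
-- it keeps the raw character sets and finds, in one pass, the element whose set differs from every
-- other element's set by direct pairwise set comparison (alternative algorithm, O(n^2) comparisons).

-- ===== PORT A =====
-- A's nested organise: set(str.lower()); if ' ' in s: s.remove(' '); ''.join(sorted(list(s)))
def organiseA (s : String) : String :=
  let st : PySem.Set Char := PySem.Set.ofList (PySem.Str.lower s).toList
  let st := if PySem.Set.contains st ' ' then (PySem.Set.remove? st ' ').getD st else st
  String.ofList (PySem.List.sorted st (fun c => c) false)

def find_uniq_string (arr : List String) : String :=
  let organised_arr := arr.map organiseA
  let c := PySem.Dict.counter organised_arr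
  match c.keys.find? (fun st => c.getD st 0 == 1) with     -- next(st for st in c if c[st] == 1); none = StopIteration, outside Pre_
  | some u => (arr.find? (fun s => u == organiseA s)).getD ""   -- next(s for s in arr if unique_chars == organise(s))
  | none => ""

-- ===== PORT B =====
-- B's char_set: set(s.lower()) - {' '}
def charSetB (s : String) : PySem.Set Char :=
  PySem.Set.diff (PySem.Set.ofList (PySem.Str.lower s).toList) (PySem.Set.ofList [' '])

def find_uniq_string_alt (arr : List String) : String :=
  let sets := arr.map charSetB
  -- next(arr[i] for i, cs in enumerate(sets) if all(i == j or cs != other for j, other in enumerate(sets)))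
  -- Python '!=' on two sets is extensional inequality: !(PySem.Set.equal …) is exact
  match (PySem.List.enumerate sets).find? (fun p =>
      (PySem.List.enumerate sets).all (fun q => p.1 == q.1 || !(PySem.Set.equal p.2 q.2))) with
  | some p => (PySem.List.pyGet? arr p.1).getD ""          -- arr[i]; i is a valid index by construction
  | none => ""                                             -- generator exhausted = StopIteration, outside Pre_

-- ===== PRECONDITION & SPEC =====
-- Pre_ excludes exactly the inputs on which A's next(...) raises StopIteration: no string whose
-- organise-key occurs exactly once in arr (in particular the empty list).
def Pre_find_uniq_string (arr : List String) : Prop :=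
  ∃ s ∈ arr, (arr.map organiseA).count (organiseA s) = 1
instance (arr : List String) : Decidable (Pre_find_uniq_string arr) := by
  unfold Pre_find_uniq_string; infer_instance

def pvWitness_find_uniq_string : List String := ["ab", "cd", "cd"]

def Spec_find_uniq_string (arr : List String) (out : String) : Prop := out = find_uniq_string_alt arr
instance (arr : List String) (out : String) : Decidable (Spec_find_uniq_string arr out) := by unfold Spec_find_uniq_string; infer_instance

-- ===== CLAIM (what is proved, stated in full; the proofs are below) =====
def Claim_equal_find_uniq_string : Prop := ∀ (arr : List String), Dom_find_uniq_string arr → Pre_find_uniq_string arr → Spec_find_uniq_string arr (find_uniq_string arr)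

-- ===== LEMMAS AND PROOFS =====

-- A's organise with its if/remove? collapsed to a single discard
lemma organiseA_eq_discard (s : String) :
    organiseA s = String.ofList (PySem.List.sorted
      (PySem.Set.discard (PySem.Set.ofList (PySem.Str.lower s).toList) ' ') (fun c => c) false) := by
  simp only [organiseA, PySem.Set.remove?]
  by_cases h : PySem.Set.contains (PySem.Set.ofList (PySem.Str.lower s).toList) ' '
  · rw [if_pos h, if_pos h, Option.getD_some]
  · rw [if_neg h]
    have h' : ' ' ∉ PySem.Set.ofList (PySem.Str.lower s).toList := by
      simpa [PySem.Set.contains] using h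
    have hfix : PySem.Set.discard (PySem.Set.ofList (PySem.Str.lower s).toList) ' '
        = PySem.Set.ofList (PySem.Str.lower s).toList := by
      unfold PySem.Set.discard
      refine List.filter_eq_self.mpr ?_
      intro c hc
      simp only [Bool.not_eq_eq_eq_not, Bool.not_true, beq_eq_false_iff_ne, ne_eq]
      intro e
      exact h' (e ▸ hc)
    rw [hfix]

lemma mem_charSetB (s : String) (x : Char) :
    x ∈ charSetB s ↔ x ∈ PySem.Set.discard (PySem.Set.ofList (PySem.Str.lower s).toList) ' ' := by
  simp [charSetB, PySem.Set.mem_diff, PySem.Set.mem_discard, PySem.Set.mem_ofList]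

-- Python 'char_set(s) == char_set(t)' decides exactly 'organise(s) == organise(t)'
lemma equal_charSetB (s t : String) :
    PySem.Set.equal (charSetB s) (charSetB t) = (organiseA s == organiseA t) := by
  rw [Bool.eq_iff_iff, PySem.Set.equal_iff, beq_iff_eq, organiseA_eq_discard, organiseA_eq_discard]
  rw [String.ofList_inj, PySem.List.sorted_id_eq_sorted_id_iff_perm]
  rw [List.perm_ext_iff_of_nodup (PySem.Set.nodup_discard _ _ (PySem.Set.nodup_ofList _))
    (PySem.Set.nodup_discard _ _ (PySem.Set.nodup_ofList _))]
  constructor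
  · intro h x; rw [← mem_charSetB, ← mem_charSetB]; exact h x
  · intro h x; rw [mem_charSetB, mem_charSetB]; exact h x

lemma find?_congr_mem {α : Type} (l : List α) (p q : α → Bool)
    (h : ∀ x ∈ l, p x = q x) : l.find? p = l.find? q := by
  induction l with
  | nil => rfl
  | cons a l ih =>
    rw [List.find?_cons, List.find?_cons, h a List.mem_cons_self]
    cases q a with
    | true => rfl
    | false => exact ih fun x hx => h x (List.mem_cons_of_mem a hx)

-- 'exactly one index satisfies p' vs 'countP p = 1', given p holds at index j
lemma countP_eq_one_iff {α : Type} (xs : List α) (p : α → Bool) (j : Nat)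
    (hj : j < xs.length) (hself : p xs[j] = true) :
    xs.countP p = 1 ↔ ∀ k, (hk : k < xs.length) → p xs[k] = true → k = j := by
  induction xs generalizing j with
  | nil => exact absurd hj (by simp)
  | cons a xs ih =>
    cases j with
    | zero =>
      simp only [List.getElem_cons_zero] at hself
      rw [List.countP_cons_of_pos hself]
      constructor
      · intro h k hk hpk
        cases k with
        | zero => rfl
        | succ k' =>
          exfalso
          have hk'l : k' < xs.length := by simpa using hk
          have hpk' : p (xs[k']'hk'l) = true := by simpa using hpk
          have : 0 < xs.countP p :=
            List.countP_pos_iff.mpr ⟨xs[k']'hk'l, List.getElem_mem hk'l, hpk'⟩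
          omega
      · intro h
        have h0 : xs.countP p = 0 := by
          rw [List.countP_eq_zero]
          intro x hx
          obtain ⟨k', hk', rfl⟩ := List.mem_iff_getElem.mp hx
          intro hpx
          have := h (k' + 1) (by simpa using Nat.succ_lt_succ hk') (by simpa using hpx)
          omega
        omega
    | succ j' =>
      have hj' : j' < xs.length := by simpa using hj
      have hself' : p xs[j'] = true := by simpa using hself
      cases hpa : p a with
      | true =>
        rw [List.countP_cons_of_pos hpa]
        constructor
        · intro h
          exfalso
          have : 0 < xs.countP p :=
            List.countP_pos_iff.mpr ⟨xs[j']'hj', List.getElem_mem hj', hself'⟩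
          omega
        · intro h
          exfalso
          have := h 0 (by simp) (by simpa using hpa)
          omega
      | false =>
        rw [List.countP_cons_of_neg (by simp [hpa])]
        rw [ih j' hj' hself']
        constructor
        · intro h k hk hpk
          cases k with
          | zero => exact absurd (by simpa using hpk) (by simp [hpa])
          | succ k' =>
            have := h k' (by simpa using hk) (by simpa using hpk)
            omega
        · intro h k hk hpk
          have := h (k + 1) (by simpa using Nat.succ_lt_succ hk) (by simpa using hpk)
          omega

-- B's inner all(...) over enumerate, pointwise on members, is a count-1 test of the set
lemma pred_eq_on_enum (sets : List (PySem.Set Char)) (p : Int × PySem.Set Char)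
    (hp : p ∈ PySem.List.enumerate sets 0)
    (hrefl : ∀ cs ∈ sets, PySem.Set.equal cs cs = true) :
    ((PySem.List.enumerate sets).all (fun q => p.1 == q.1 || !(PySem.Set.equal p.2 q.2)))
      = (sets.countP (fun o => PySem.Set.equal p.2 o) == 1) := by
  obtain ⟨k, hk, rfl⟩ := (PySem.List.mem_enumerate_iff sets 0 p).mp hp
  simp only [zero_add]
  rw [Bool.eq_iff_iff, List.all_eq_true, beq_iff_eq,
    countP_eq_one_iff sets _ k hk (hrefl _ (List.getElem_mem _))]
  constructor
  · intro h k' hk' hpk'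
    have := h ((k' : Int), sets[k']) ((PySem.List.mem_enumerate_iff sets 0 _).mpr ⟨k', hk', by simp⟩)
    rcases Bool.or_eq_true _ _ |>.mp this with h1 | h1
    · have h2 := beq_iff_eq.mp h1
      simp only at h2
      exact_mod_cast h2.symm
    · rw [hpk'] at h1; simp at h1
  · intro h q hq
    obtain ⟨k', hk', rfl⟩ := (PySem.List.mem_enumerate_iff sets 0 q).mp hq
    simp only [zero_add]
    by_cases he : PySem.Set.equal sets[k] sets[k'] = true
    · have : k' = k := h k' hk' he
      subst this; simp
    · simp [he]

-- B's enumerate-find?, for a predicate on the set alone, is a plain find? on arr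
lemma alt_find (g : PySem.Set Char → Bool) (pre arr : List String) :
    (match (PySem.List.enumerate (arr.map charSetB) (pre.length : Int)).find? (fun p => g p.2) with
     | some p => (PySem.List.pyGet? (pre ++ arr) p.1).getD ""
     | none => "") = (arr.find? (fun s => g (charSetB s))).getD "" := by
  induction arr generalizing pre with
  | nil => rfl
  | cons a arr ih =>
    rw [List.map_cons, PySem.List.enumerate_cons, List.find?_cons, List.find?_cons]
    cases hga : g (charSetB a) with
    | true => simp
    | false =>
      have hlen : ((pre.length : Int) + 1) = (((pre ++ [a]).length : Int)) := by
        simp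
      have hassoc : pre ++ a :: arr = (pre ++ [a]) ++ arr := by simp
      rw [hlen, hassoc]
      exact ih (pre ++ [a])

-- A's first-count-1-key-then-rescan is a plain find? on arr (generic in key f and test q)
lemma ofList_find? (f : String → String) (q : String → Bool) (arr : List String) :
    (PySem.Set.ofList (arr.map f)).find? q = (arr.find? (fun s => q (f s))).map f := by
  induction arr with
  | nil => rfl
  | cons a arr ih =>
    rw [List.map_cons, PySem.Set.ofList_cons, List.find?_cons, List.find?_cons]
    cases hqa : q (f a) with
    | true => rfl
    | false =>
      rw [← ih]
      show List.find? q (List.filter (fun y => !(y == f a)) (PySem.Set.ofList (arr.map f))) = _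
      rw [List.find?_filter]
      apply find?_congr_mem
      intro x _
      by_cases hx : x = f a
      · subst hx; simp [hqa]
      · simp [hx]

lemma find?_self_key (f : String → String) (q : String → Bool) (arr : List String) (s₀ : String)
    (h : arr.find? (fun s => q (f s)) = some s₀) :
    arr.find? (fun s => f s₀ == f s) = some s₀ := by
  induction arr with
  | nil => simp at h
  | cons a arr ih =>
    rw [List.find?_cons] at h ⊢
    cases hqa : q (f a) with
    | true =>
      rw [hqa] at h
      cases h
      simp
    | false =>
      rw [hqa] at h
      have hq0 : q (f s₀) = true := by
        have := List.find?_some h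
        simpa using this
      have hne : (f s₀ == f a) = false := by
        rw [beq_eq_false_iff_ne]
        intro he
        rw [he] at hq0
        rw [hq0] at hqa
        exact Bool.true_eq_false.mp hqa
      rw [hne]
      exact ih h

-- the common reference: first element of arr whose test holds, default ""
lemma A_eq_ref (arr : List String) :
    find_uniq_string arr
      = (arr.find? (fun s =>
          (PySem.Dict.counter (arr.map organiseA)).getD (organiseA s) 0 == 1)).getD "" := by
  unfold find_uniq_string
  simp only [PySem.Dict.keys_counter]
  rw [ofList_find? organiseA (fun st => (PySem.Dict.counter (arr.map organiseA)).getD st 0 == 1) arr]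
  cases hf : arr.find? (fun s => (PySem.Dict.counter (arr.map organiseA)).getD (organiseA s) 0 == 1) with
  | none => rfl
  | some s₀ =>
    simp only [Option.map_some]
    rw [find?_self_key organiseA
      (fun st => (PySem.Dict.counter (arr.map organiseA)).getD st 0 == 1) arr s₀ hf]

lemma B_eq_ref (arr : List String) :
    find_uniq_string_alt arr
      = (arr.find? (fun s =>
          ((arr.map charSetB).countP (fun o => PySem.Set.equal (charSetB s) o) == 1))).getD "" := by
  simp only [find_uniq_string_alt]
  rw [find?_congr_mem _ _ (fun p => ((arr.map charSetB).countP (fun o => PySem.Set.equal p.2 o) == 1))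
    (fun p hp => pred_eq_on_enum (arr.map charSetB) p hp
      (fun cs _ => (PySem.Set.equal_iff cs cs).mpr (fun x => Iff.rfl)))]
  have := alt_find (fun cs => ((arr.map charSetB).countP (fun o => PySem.Set.equal cs o) == 1)) [] arr
  simpa using this

-- the two tests agree on every string
lemma tests_agree (arr : List String) (s : String) :
    ((PySem.Dict.counter (arr.map organiseA)).getD (organiseA s) 0 == 1)
      = ((arr.map charSetB).countP (fun o => PySem.Set.equal (charSetB s) o) == 1) := by
  rw [PySem.Dict.getD_counter]
  have hc : (arr.map charSetB).countP (fun o => PySem.Set.equal (charSetB s) o)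
      = (arr.map organiseA).count (organiseA s) := by
    rw [List.count_eq_countP (a := organiseA s) (l := arr.map organiseA)]
    rw [List.countP_map, List.countP_map]
    apply List.countP_congr
    intro t _
    simp only [Function.comp_apply, equal_charSetB, beq_iff_eq]
    exact eq_comm
  rw [hc]
  rw [Bool.eq_iff_iff, beq_iff_eq, beq_iff_eq]
  omega

-- ===== VERDICT (by name: the statement is the Claim_ definition above) =====
theorem find_uniq_string_spec : Claim_equal_find_uniq_string := by
  intro arr _ _
  unfold Spec_find_uniq_string
  rw [A_eq_ref, B_eq_ref]
  congr 1
  exact find?_congr_mem _ _ _ (fun s _ => tests_agree arr s)
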